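-- pv_equiv track=rewrite | github.com/zerron1337/rollbot | rollbot.py | get_dubs_power
-- ===== SOURCE A (Python) =====
-- dubs_power_str = {
--     1: None,
--     10: None,
--     2: 'dubs',
--     20: 'fake dubs',
--     3: 'trips',
--     30: 'fake trips',
--     4: 'quads',
--     40: 'fake quads',
--     5: 'quints',
--     50: 'fake quints',
--     6: 'GET',
--     60: 'fake GET'
-- }
--
-- def get_dubs_power(roll, lower, upper):
--     if roll < 10 and upper - lower >= 99:
--         return dubs_power_str[1]
--     n = 1
--     div = 1
--     scale = 10 ** n
--     while (roll % scale) % div == 0: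
--         n += 1
--         div = 1
--         scale = 10 ** n
--         for i in range(1, n):
--             div = div * 10 + 1
--     if n > 7:
--         n = 7
--     if upper - lower >= (scale / 10 - 1) and n > 2:
--         return dubs_power_str[n - 1]
--     else:
--         return dubs_power_str[(n - 1) * 10]
-- ===== SOURCE B (Python) =====
-- dubs_power_str = {
--     1: None,
--     10: None,
--     2: 'dubs',
--     20: 'fake dubs',
--     3: 'trips',
--     30: 'fake trips',
--     4: 'quads',
--     40: 'fake quads',
--     5: 'quints',
--     50: 'fake quints',
--     6: 'GET',
--     60: 'fake GET'
-- }
--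
-- def get_dubs_power(roll, lower, upper):
--     if roll < 10 and upper - lower >= 99:
--         return dubs_power_str[1]
--     # digit-peel: count how many trailing digits equal the last digit
--     d = roll % 10
--     t = 1
--     r = roll // 10
--     while r % 10 == d:
--         t += 1
--         r //= 10
--     scale = 10 ** (t + 1)
--     n = min(t + 1, 7)
--     if upper - lower >= scale // 10 - 1 and n > 2:
--         return dubs_power_str[n - 1]
--     return dubs_power_str[(n - 1) * 10]
-- ===== Notes on version B (the rewrite author's own statement) =====
-- stated objective: simpler
-- what changed: B counts trailing equal digits with a single digit-peeling loop (roll //= 10, compare each digit to the last one) instead of A's repunit-divisibility test with an inner loop that rebuilds the repunit 11...1 every iteration; the cap, range check and dict lookups are unchanged, and Pre_ excludes only roll in {0,-1} with upper-lower < 99, where A's (and B's) loop never terminates.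
import Mathlib
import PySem

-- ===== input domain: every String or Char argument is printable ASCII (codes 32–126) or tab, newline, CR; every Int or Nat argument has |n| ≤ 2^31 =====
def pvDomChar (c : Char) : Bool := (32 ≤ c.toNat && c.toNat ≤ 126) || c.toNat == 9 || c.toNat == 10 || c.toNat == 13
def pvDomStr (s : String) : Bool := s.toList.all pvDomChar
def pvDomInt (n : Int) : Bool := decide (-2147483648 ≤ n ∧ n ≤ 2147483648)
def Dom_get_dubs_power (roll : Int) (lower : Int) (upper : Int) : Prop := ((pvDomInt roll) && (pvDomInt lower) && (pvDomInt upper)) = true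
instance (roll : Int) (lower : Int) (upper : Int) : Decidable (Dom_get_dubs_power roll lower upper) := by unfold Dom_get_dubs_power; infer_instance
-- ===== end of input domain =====

-- B replaces A's repunit-divisibility test (with its inner repunit-rebuilding loop) by a single
-- digit-peeling loop that counts trailing digits equal to the last digit; same return values.

-- the module-level dict dubs_power_str (values Optional[str] → Option String)
def dubsDict : PySem.Dict Int (Option String) :=
  PySem.Dict.ofList [(1, none), (10, none), (2, some "dubs"), (20, some "fake dubs"),
    (3, some "trips"), (30, some "fake trips"), (4, some "quads"), (40, some "fake quads"),
    (5, some "quints"), (50, some "fake quints"), (6, some "GET"), (60, some "fake GET")]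

-- dubs_power_str[k]; every key the two programs look up is present (n ∈ 2..7 after the cap),
-- so the KeyError branch is unreachable and '.getD none' never fires on a missing key.
def dubsAt (k : Int) : Option String := (PySem.Dict.get? dubsDict k).getD none

-- ===== PORT A =====
-- inner loop 'div = 1; for i in range(1, n): div = div * 10 + 1'
def pvRepunit (n : Int) : Int := (PySem.List.pyRange 1 n 1).foldl (fun d _ => d * 10 + 1) 1

-- the while loop; fuel bounds the recursion only (inside Pre_ the loop exits long before 65 steps)
def pvLoopA (fuel : Nat) (roll n div scale : Int) : Int × Int :=
  match fuel with
  | 0 => (n, scale)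
  | fuel + 1 =>
    if PySem.Int.mod (PySem.Int.mod roll scale) div = 0 then
      pvLoopA fuel roll (n + 1) (pvRepunit (n + 1)) ((10 : Int) ^ (n + 1).toNat)  -- 10 ** n after n += 1 (n ≥ 1 here)
    else (n, scale)

def get_dubs_power (roll : Int) (lower : Int) (upper : Int) : Option String :=
  if roll < 10 ∧ upper - lower ≥ 99 then dubsAt 1
  else
    -- n = 1; div = 1; scale = 10 ** 1; while …
    let p := pvLoopA 65 roll 1 1 10
    let n := if p.1 > 7 then 7 else p.1
    -- 'upper - lower >= (scale / 10 - 1)': float division, exact here (scale = 10^m, m ≤ 12 on Dom∩Pre_),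
    -- ported as the equal integer floor division
    if upper - lower ≥ PySem.Int.floordiv p.2 10 - 1 ∧ n > 2 then dubsAt (n - 1)
    else dubsAt ((n - 1) * 10)

-- ===== PORT B =====
-- 'while r % 10 == d: t += 1; r //= 10'
def pvLoopB (fuel : Nat) (d r t : Int) : Int :=
  match fuel with
  | 0 => t
  | fuel + 1 =>
    if PySem.Int.mod r 10 = d then pvLoopB fuel d (PySem.Int.floordiv r 10) (t + 1) else t

def get_dubs_power_alt (roll : Int) (lower : Int) (upper : Int) : Option String :=
  if roll < 10 ∧ upper - lower ≥ 99 then dubsAt 1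
  else
    let d := PySem.Int.mod roll 10
    let t := pvLoopB 64 d (PySem.Int.floordiv roll 10) 1
    let scale := (10 : Int) ^ (t + 1).toNat
    let n := min (t + 1) 7
    if upper - lower ≥ PySem.Int.floordiv scale 10 - 1 ∧ n > 2 then dubsAt (n - 1)
    else dubsAt ((n - 1) * 10)

-- ===== PRECONDITION & SPEC =====
-- Pre_ excludes only roll ∈ {0, -1} with upper - lower < 99: there A's while loop (and B's) never
-- terminates — every trailing digit keeps matching — so A returns on exactly the inputs admitted here.
def Pre_get_dubs_power (roll : Int) (lower : Int) (upper : Int) : Prop :=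
  (roll ≠ 0 ∧ roll ≠ -1) ∨ upper - lower ≥ 99
instance (roll : Int) (lower : Int) (upper : Int) : Decidable (Pre_get_dubs_power roll lower upper) := by
  unfold Pre_get_dubs_power; infer_instance

def pvWitness_get_dubs_power : Int × Int × Int := (11, 0, 100)

def Spec_get_dubs_power (roll : Int) (lower : Int) (upper : Int) (out : Option String) : Prop := out = get_dubs_power_alt roll lower upper
instance (roll : Int) (lower : Int) (upper : Int) (out : Option String) : Decidable (Spec_get_dubs_power roll lower upper out) := by unfold Spec_get_dubs_power; infer_instance

-- ===== CLAIM (what is proved, stated in full; the proofs are below) =====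
def Claim_equal_get_dubs_power : Prop := ∀ (roll : Int) (lower : Int) (upper : Int), Dom_get_dubs_power roll lower upper → Pre_get_dubs_power roll lower upper → Spec_get_dubs_power roll lower upper (get_dubs_power roll lower upper)

-- ===== LEMMAS AND PROOFS =====

-- j-th decimal digit of roll, Python-style: (roll // 10**j) % 10
def pvDig (roll : Int) (j : Nat) : Int := roll / (10 : Int) ^ j % 10

-- repunit 1…1 with k ones (repN 0 = 0, repN 1 = 1, repN 2 = 11, …)
def pvRepN : Nat → Int
  | 0 => 0
  | k + 1 => 10 * pvRepN k + 1

theorem pvRepN_nine (k : Nat) : 9 * pvRepN k = 10 ^ k - 1 := by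
  induction k with
  | zero => simp [pvRepN]
  | succ k ih => rw [pvRepN, pow_succ]; ring_nf; ring_nf at ih; omega

theorem pvRepN_pos (k : Nat) (hk : 1 ≤ k) : 1 ≤ pvRepN k := by
  have h := pvRepN_nine k
  have : (10 : Int) ^ 1 ≤ 10 ^ k := pow_le_pow_right₀ (by norm_num) hk
  simp at this; omega

theorem pvRepN_split (k : Nat) : pvRepN (k + 1) = 10 ^ k + pvRepN k := by
  have h1 := pvRepN_nine (k + 1)
  have h2 := pvRepN_nine k
  rw [pow_succ] at h1
  omega

theorem pvRepunit_cast (k : Nat) (hk : 1 ≤ k) : pvRepunit (k : Int) = pvRepN k := by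
  induction k with
  | zero => omega
  | succ k ih =>
    rcases Nat.eq_or_lt_of_le hk with h | h
    · have hk0 : k = 0 := by omega
      subst hk0
      simp [pvRepunit, pvRepN, PySem.List.pyRange_one_eq_nil (by norm_num : (1:Int) ≤ 1)]
    · have hk1 : 1 ≤ k := by omega
      have hc : (1 : Int) ≤ (k : Int) := by exact_mod_cast hk1
      have : ((k + 1 : Nat) : Int) = (k : Int) + 1 := by push_cast; ring
      rw [pvRepunit, this, PySem.List.pyRange_one_succ_right hc, List.foldl_append]
      simp only [pvRepN, ← ih hk1, pvRepunit, List.foldl]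
      ring

theorem pvDig_zero (roll : Int) : pvDig roll 0 = roll % 10 := by simp [pvDig]

theorem pvDig_bounds (roll : Int) (j : Nat) : 0 ≤ pvDig roll j ∧ pvDig roll j < 10 := by
  exact ⟨Int.emod_nonneg _ (by norm_num), Int.emod_lt_of_pos _ (by norm_num)⟩

theorem pv_emod_pow_succ (roll : Int) (k : Nat) :
    roll % (10 : Int) ^ (k + 1) = pvDig roll k * 10 ^ k + roll % 10 ^ k := by
  have hp : (0 : Int) < 10 ^ k := by positivity
  set q := roll / (10 : Int) ^ k with hq
  set r := roll % (10 : Int) ^ k with hr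
  have hqr : (10 : Int) ^ k * q + r = roll := Int.mul_ediv_add_emod roll (10 ^ k)
  have hq2 : (10 : Int) * (q / 10) + q % 10 = q := Int.mul_ediv_add_emod q 10
  have hr0 : 0 ≤ r := Int.emod_nonneg roll (by positivity)
  have hr1 : r < 10 ^ k := Int.emod_lt_of_pos roll hp
  have hm0 : 0 ≤ q % 10 := Int.emod_nonneg q (by norm_num)
  have hm1 : q % 10 < 10 := Int.emod_lt_of_pos q (by norm_num)
  have key : roll = (q % 10 * 10 ^ k + r) + (10 : Int) ^ (k + 1) * (q / 10) := by
    rw [pow_succ]; linear_combination - hqr - (10 : Int) ^ k * hq2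
  have hmul : q % 10 * 10 ^ k ≤ 9 * 10 ^ k :=
    mul_le_mul_of_nonneg_right (by omega) (le_of_lt hp)
  have hge : 0 ≤ q % 10 * 10 ^ k + r := by positivity
  have hlt : q % 10 * 10 ^ k + r < 10 ^ (k + 1) := by
    rw [pow_succ]; nlinarith
  calc roll % 10 ^ (k + 1)
      = ((q % 10 * 10 ^ k + r) + 10 ^ (k + 1) * (q / 10)) % 10 ^ (k + 1) := by rw [← key]
    _ = (q % 10 * 10 ^ k + r) % 10 ^ (k + 1) := by rw [Int.add_mul_emod_self_left]
    _ = q % 10 * 10 ^ k + r := Int.emod_eq_of_lt hge hlt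

theorem pv_sumRep (roll : Int) (k : Nat) (hk : 1 ≤ k)
    (hrun : ∀ j, j < k → pvDig roll j = roll % 10) :
    roll % (10 : Int) ^ k = (roll % 10) * pvRepN k := by
  induction k with
  | zero => omega
  | succ k ih =>
    rcases Nat.eq_zero_or_pos k with h | h
    · subst h; simp [pvRepN, pow_one]
    · have hrun' : ∀ j, j < k → pvDig roll j = roll % 10 := fun j hj => hrun j (by omega)
      rw [pv_emod_pow_succ, ih h hrun', hrun k (by omega), pvRepN_split]
      ring

theorem pv_cond_iff (roll : Int) (k : Nat) (hk : 1 ≤ k)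
    (hrun : ∀ j, j < k → pvDig roll j = roll % 10) :
    (roll % (10 : Int) ^ (k + 1)) % pvRepN (k + 1) = 0 ↔ pvDig roll k = roll % 10 := by
  have hRpos : 1 ≤ pvRepN (k + 1) := pvRepN_pos _ (by omega)
  have hs1 : 1 ≤ pvRepN k := pvRepN_pos k hk
  have h9 : 9 * pvRepN k = 10 ^ k - 1 := pvRepN_nine k
  have h9R : 9 * pvRepN (k + 1) = 10 ^ (k + 1) - 1 := pvRepN_nine (k + 1)
  have hsplit : pvRepN (k + 1) = 10 ^ k + pvRepN k := pvRepN_split k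
  have hpk : (0 : Int) < 10 ^ k := by positivity
  have hd := pvDig_bounds roll k
  have hb0 : 0 ≤ roll % 10 := Int.emod_nonneg roll (by norm_num)
  have hb1 : roll % 10 < 10 := Int.emod_lt_of_pos roll (by norm_num)
  have hv : roll % (10 : Int) ^ (k + 1) = pvDig roll k * 10 ^ k + (roll % 10) * pvRepN k := by
    rw [pv_emod_pow_succ, pv_sumRep roll k hk hrun]
  constructor
  · intro h0
    obtain ⟨m, hm⟩ := Int.dvd_of_emod_eq_zero h0
    have hvpos : 0 ≤ roll % (10 : Int) ^ (k + 1) := Int.emod_nonneg _ (by positivity)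
    have hvlt : roll % (10 : Int) ^ (k + 1) < 10 ^ (k + 1) := Int.emod_lt_of_pos _ (by positivity)
    have hm0 : 0 ≤ m := by nlinarith
    have hm9 : m ≤ 9 := by nlinarith
    have heq : pvDig roll k * 10 ^ k + (roll % 10) * pvRepN k = m * 10 ^ k + m * pvRepN k := by
      rw [← hv, hm, hsplit]; ring
    have hpe : (pvDig roll k - m) * 10 ^ k = (m - roll % 10) * pvRepN k := by
      linear_combination heq
    rcases lt_trichotomy (pvDig roll k) m with hlt | heqm | hgt
    · exfalso
      have h1 : (pvDig roll k - m) * 10 ^ k ≤ -1 * 10 ^ k :=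
        mul_le_mul_of_nonneg_right (by omega) (le_of_lt hpk)
      have h2 : (-9 : Int) * pvRepN k ≤ (m - roll % 10) * pvRepN k :=
        mul_le_mul_of_nonneg_right (by omega) (by omega)
      linarith
    · have : (m - roll % 10) * pvRepN k = 0 := by rw [← hpe, heqm]; ring
      rcases mul_eq_zero.mp this with h | h <;> omega
    · exfalso
      have h1 : (1 : Int) * 10 ^ k ≤ (pvDig roll k - m) * 10 ^ k :=
        mul_le_mul_of_nonneg_right (by omega) (le_of_lt hpk)
      have h2 : (m - roll % 10) * pvRepN k ≤ 9 * pvRepN k :=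
        mul_le_mul_of_nonneg_right (by omega) (by omega)
      linarith
  · intro h
    have hrun' : ∀ j, j < k + 1 → pvDig roll j = roll % 10 := by
      intro j hj
      rcases Nat.lt_succ_iff_lt_or_eq.mp hj with hj' | hj'
      · exact hrun j hj'
      · subst hj'; exact h
    rw [pv_sumRep roll (k + 1) (by omega) hrun', mul_comm]
    exact Int.mul_emod_right _ _

theorem pv_loops_eq (f : Nat) (roll : Int) (k : Nat) (hk : 1 ≤ k)
    (hrun : ∀ j, j < k → pvDig roll j = roll % 10)
    (hstop : ∃ j, k ≤ j ∧ j < k + f ∧ pvDig roll j ≠ roll % 10) :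
    ∃ t : Nat, k ≤ t ∧
      pvLoopA f roll ((k : Int) + 1) (pvRepunit ((k : Int) + 1)) ((10 : Int) ^ (k + 1)) =
        ((t : Int) + 1, (10 : Int) ^ (t + 1)) ∧
      pvLoopB f (roll % 10) (roll / (10 : Int) ^ k) (k : Int) = (t : Int) := by
  induction f generalizing k with
  | zero =>
    exfalso; obtain ⟨j, hj1, hj2, _⟩ := hstop; omega
  | succ f ih =>
    have hRc : pvRepunit ((k : Int) + 1) = pvRepN (k + 1) := by
      have h := pvRepunit_cast (k + 1) (by omega)
      push_cast at h; exact h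
    have hcond := pv_cond_iff roll k hk hrun
    have hmods : PySem.Int.mod roll ((10 : Int) ^ (k + 1)) = roll % 10 ^ (k + 1) :=
      PySem.Int.mod_eq_emod_of_pos (by positivity)
    have hmodr : PySem.Int.mod (roll % (10 : Int) ^ (k + 1)) (pvRepN (k + 1))
        = (roll % (10 : Int) ^ (k + 1)) % pvRepN (k + 1) :=
      PySem.Int.mod_eq_emod_of_pos (by have := pvRepN_pos (k + 1) (by omega); omega)
    have hmodB : PySem.Int.mod (roll / (10 : Int) ^ k) 10 = pvDig roll k :=
      PySem.Int.mod_eq_emod_of_pos (by norm_num)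
    by_cases hdk : pvDig roll k = roll % 10
    · -- both loops take another step
      have hcondT : (roll % (10 : Int) ^ (k + 1)) % pvRepN (k + 1) = 0 := hcond.mpr hdk
      have hrun' : ∀ j, j < k + 1 → pvDig roll j = roll % 10 := by
        intro j hj
        rcases Nat.lt_succ_iff_lt_or_eq.mp hj with hj' | hj'
        · exact hrun j hj'
        · subst hj'; exact hdk
      have hstop' : ∃ j, k + 1 ≤ j ∧ j < (k + 1) + f ∧ pvDig roll j ≠ roll % 10 := by
        obtain ⟨j, hj1, hj2, hj3⟩ := hstop
        refine ⟨j, ?_, by omega, hj3⟩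
        have hne : j ≠ k := fun hjk => hj3 (hjk ▸ hdk)
        omega
      obtain ⟨t, ht1, htA, htB⟩ := ih (k + 1) (by omega) hrun' hstop'
      refine ⟨t, by omega, ?_, ?_⟩
      · rw [pvLoopA, hRc, hmods, hmodr, if_pos hcondT]
        have e1 : (k : Int) + 1 + 1 = ((k + 1 : Nat) : Int) + 1 := by push_cast; ring
        have e2 : ((k : Int) + 1 + 1).toNat = (k + 1) + 1 := by omega
        rw [e2, e1]
        exact htA
      · rw [pvLoopB, hmodB, if_pos hdk]
        have hdiv : PySem.Int.floordiv (roll / (10 : Int) ^ k) 10 = roll / (10 : Int) ^ (k + 1) := by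
          rw [PySem.Int.floordiv_eq_ediv_of_pos (by norm_num),
            Int.ediv_ediv_of_nonneg (by positivity), ← pow_succ]
        have e1 : (k : Int) + 1 = ((k + 1 : Nat) : Int) := by push_cast; ring
        rw [hdiv, e1]
        exact htB
    · -- both loops exit here, t = k
      have hcondF : ¬ (roll % (10 : Int) ^ (k + 1)) % pvRepN (k + 1) = 0 := fun h => hdk (hcond.mp h)
      refine ⟨k, le_refl k, ?_, ?_⟩
      · rw [pvLoopA, hRc, hmods, hmodr, if_neg hcondF]
      · rw [pvLoopB, hmodB, if_neg hdk]

theorem pv_hstop (roll : Int) (hd : -2147483648 ≤ roll ∧ roll ≤ 2147483648)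
    (h0 : roll ≠ 0) (h1 : roll ≠ -1) :
    ∃ j, 1 ≤ j ∧ j < 1 + 64 ∧ pvDig roll j ≠ roll % 10 := by
  by_contra hcon
  push Not at hcon
  have hrun : ∀ j, j < 12 → pvDig roll j = roll % 10 := by
    intro j hj
    rcases Nat.eq_zero_or_pos j with h | h
    · subst h; exact pvDig_zero roll
    · exact hcon j h (by omega)
  have hsum := pv_sumRep roll 12 (by norm_num) hrun
  have hrep : pvRepN 12 = 111111111111 := by decide
  rw [hrep] at hsum
  have he0 := Int.mul_ediv_add_emod roll ((10 : Int) ^ 12)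
  rw [hsum] at he0
  have hb0 : 0 ≤ roll % 10 := Int.emod_nonneg _ (by norm_num)
  have hb1 : roll % 10 < 10 := Int.emod_lt_of_pos _ (by norm_num)
  have he : (1000000000000 : Int) * (roll / (10 : Int) ^ 12) + roll % 10 * 111111111111 = roll := by
    norm_num at he0; exact he0
  clear hcon hrun hsum he0
  generalize roll / (10 : Int) ^ 12 = q at he
  generalize roll % 10 = b at he hb0 hb1
  have hql : (-2 : Int) * 1000000000000 < 1000000000000 * q := by nlinarith
  have hqu : (1000000000000 : Int) * q < 1000000000000 := by nlinarith
  have hq1 : (-1 : Int) ≤ q := by nlinarith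
  have hq2 : q ≤ 0 := by nlinarith
  interval_cases q <;> omega

-- ===== VERDICT (by name: the statement is the Claim_ definition above) =====
theorem get_dubs_power_spec : Claim_equal_get_dubs_power := by
  intro roll lower upper hDom hPre
  unfold Spec_get_dubs_power
  by_cases hc : roll < 10 ∧ upper - lower ≥ 99
  · simp only [get_dubs_power, get_dubs_power_alt, if_pos hc]
  · have hDom' : -2147483648 ≤ roll ∧ roll ≤ 2147483648 := by
      simp only [Dom_get_dubs_power, pvDomInt, Bool.and_eq_true, decide_eq_true_eq] at hDom
      exact hDom.1.1
    have h0 : roll ≠ 0 ∧ roll ≠ -1 := by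
      rcases hPre with h | h
      · exact h
      · constructor <;> rintro rfl <;> exact hc ⟨by norm_num, h⟩
    obtain ⟨t, ht1, htA, htB⟩ :=
      pv_loops_eq 64 roll 1 (le_refl 1)
        (by intro j hj; interval_cases j; exact pvDig_zero roll)
        (pv_hstop roll hDom' h0.1 h0.2)
    simp only [get_dubs_power, get_dubs_power_alt, if_neg hc]
    -- unroll A's first iteration (condition (roll % 10) % 1 == 0 always holds)
    have hA1 : pvLoopA 65 roll 1 1 10 = ((t : Int) + 1, (10 : Int) ^ (t + 1)) := by
      rw [pvLoopA]
      have hm1 : PySem.Int.mod (PySem.Int.mod roll 10) 1 = 0 := by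
        rw [PySem.Int.mod_eq_emod_of_pos (by norm_num : (0:Int) < 1), Int.emod_one]
      rw [if_pos hm1]
      have e1 : ((1 : Int) + 1).toNat = 1 + 1 := by decide
      rw [e1]
      have e2 : ((1 : Nat) : Int) + 1 = (1 : Int) + 1 := by norm_num
      have := htA
      rw [e2] at this
      exact this
    have hB1 : pvLoopB 64 (PySem.Int.mod roll 10) (PySem.Int.floordiv roll 10) 1 = (t : Int) := by
      have hm : PySem.Int.mod roll 10 = roll % 10 := PySem.Int.mod_eq_emod_of_pos (by norm_num)
      have hf : PySem.Int.floordiv roll 10 = roll / 10 := PySem.Int.floordiv_eq_ediv_of_pos (by norm_num)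
      rw [hm, hf]
      have := htB
      norm_num at this
      exact this
    rw [hA1, hB1]
    have htn : ((t : Int) + 1).toNat = t + 1 := by omega
    rw [htn]
    have hmin : min ((t : Int) + 1) 7 = if (t : Int) + 1 > 7 then 7 else (t : Int) + 1 := by
      rcases le_or_gt ((t : Int) + 1) 7 with h | h
      · rw [min_eq_left h, if_neg (by omega)]
      · rw [min_eq_right (by omega), if_pos (by omega)]
    rw [hmin]
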